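-- pv_equiv track=rewrite | github.com/Skezza/pm99-research | app/eq_jug_linked.py | _trim_uppercase_suffix_artifact
-- ===== SOURCE A (Python) =====
-- from typing import Dict, List, Optional
--
-- def _alpha_letters(text: str) -> str:
--     return "".join(ch for ch in text if ch.isalpha())
--
-- def _trim_uppercase_suffix_artifact(token: str) -> str:
--     alpha = _alpha_letters(token)
--     if len(alpha) < 4:
--         return token
--
--     uppercase_prefix = 0
--     for ch in alpha:
--         if ch.isupper():
--             uppercase_prefix += 1
--         else:
--             break
--
--     if uppercase_prefix < 3 or uppercase_prefix >= len(alpha):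
--         return token
--     if not alpha[uppercase_prefix:].islower():
--         return token
--
--     out: List[str] = []
--     seen_letters = 0
--     for ch in token:
--         out.append(ch)
--         if ch.isalpha():
--             seen_letters += 1
--             if seen_letters >= uppercase_prefix:
--                 break
--     return "".join(out).rstrip(" .'-")
-- ===== SOURCE B (Python) =====
-- def _trim_uppercase_suffix_artifact(token: str) -> str:
--     # Scan from the right for the last uppercase character; split the token there
--     # and validate the two sides instead of counting an uppercase run left-to-right.
--     last_upper = -1
--     for i in reversed(range(len(token))):
--         if token[i].isupper():
--             last_upper = i
--             break
--     if last_upper == -1: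
--         return token
--     head = [c for c in token[:last_upper + 1] if c.isalpha()]
--     tail = [c for c in token[last_upper + 1:] if c.isalpha()]
--     if len(head) < 3 or not tail or not all(c.isupper() for c in head):
--         return token
--     return token[:last_upper + 1].rstrip(" .'-")
-- ===== Notes on version B (the rewrite author's own statement) =====
-- stated objective: alternative
-- what changed: B scans the token right-to-left for the LAST uppercase character, splits the token at that index, and validates the two sides (at least 3 letters before it, all uppercase; at least one letter after it), replacing A's alpha-string extraction, left-to-right uppercase-run count and char-by-char output-accumulation loop with a direct prefix slice ending at that index.
import Mathlib
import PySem

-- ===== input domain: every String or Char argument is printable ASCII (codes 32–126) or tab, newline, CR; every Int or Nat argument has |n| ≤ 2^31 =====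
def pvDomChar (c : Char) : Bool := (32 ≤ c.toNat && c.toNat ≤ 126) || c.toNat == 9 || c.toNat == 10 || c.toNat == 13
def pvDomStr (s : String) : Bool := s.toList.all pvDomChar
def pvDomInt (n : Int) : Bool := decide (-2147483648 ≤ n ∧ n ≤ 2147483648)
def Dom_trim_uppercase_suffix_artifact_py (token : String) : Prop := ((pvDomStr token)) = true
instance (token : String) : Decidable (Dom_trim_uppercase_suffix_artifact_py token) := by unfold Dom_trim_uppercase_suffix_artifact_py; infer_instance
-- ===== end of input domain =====

-- B replaces A's left-to-right uppercase-run counting over the extracted alpha string and its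
-- char-by-char output-building loop by a right-to-left scan for the LAST uppercase character,
-- splitting the token there and validating the two sides (objective: alternative).

-- ===== PORT A =====
-- A's for-loop with break: length of the leading uppercase run
def pvUpRunA : List Char → Nat
  | [] => 0
  | c :: cs => if PySem.Chars.isupper c then pvUpRunA cs + 1 else 0

-- A's output loop: append chars, break once the u-th letter has been copied
def pvOutLoopA (u : Nat) : List Char → Nat → List Char
  | [], _ => []
  | c :: cs, seen =>
    if PySem.Chars.isalpha c then
      (if u ≤ seen + 1 then [c] else c :: pvOutLoopA u cs (seen + 1))
    else c :: pvOutLoopA u cs seen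

-- s.rstrip(" .'-"): exact (Python strips that char set from the right)
def pvRstripArt (l : List Char) : List Char :=
  (l.reverse.dropWhile (fun c => c == ' ' || c == '.' || c == '\'' || c == '-')).reverse

def trim_uppercase_suffix_artifact_py (token : String) : String :=
  let alpha := token.toList.filter PySem.Chars.isalpha
  if alpha.length < 4 then token
  else
    let u := pvUpRunA alpha
    if u < 3 ∨ alpha.length ≤ u then token
    else if ¬ (alpha.drop u ≠ [] ∧ (alpha.drop u).all PySem.Chars.islower) then token
      -- str.islower(): some cased char and no uppercase; exact here since every char of alpha is a letter
    else String.ofList (pvRstripArt (pvOutLoopA u token.toList 0))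

-- ===== PORT B =====
-- B's reversed-range loop with break: index of the LAST uppercase char (none = -1 sentinel)
def pvLastUpperB : List Char → Option Nat
  | [] => none
  | c :: cs =>
    match pvLastUpperB cs with
    | some k => some (k + 1)
    | none => if PySem.Chars.isupper c then some 0 else none

def trim_uppercase_suffix_artifact_py_alt (token : String) : String :=
  let tl := token.toList
  match pvLastUpperB tl with
  | none => token
  | some j =>
    let head := (tl.take (j + 1)).filter PySem.Chars.isalpha
    let tail := (tl.drop (j + 1)).filter PySem.Chars.isalpha
    if head.length < 3 ∨ tail = [] ∨ ¬ head.all PySem.Chars.isupper then token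
    else String.ofList (pvRstripArt (tl.take (j + 1)))

-- ===== PRECONDITION & SPEC =====
def Spec_trim_uppercase_suffix_artifact_py (token : String) (out : String) : Prop := out = trim_uppercase_suffix_artifact_py_alt token
instance (token : String) (out : String) : Decidable (Spec_trim_uppercase_suffix_artifact_py token out) := by unfold Spec_trim_uppercase_suffix_artifact_py; infer_instance

-- ===== CLAIM (what is proved, stated in full; the proofs are below) =====
def Claim_equal_trim_uppercase_suffix_artifact_py : Prop := ∀ (token : String), Dom_trim_uppercase_suffix_artifact_py token → Spec_trim_uppercase_suffix_artifact_py token (trim_uppercase_suffix_artifact_py token)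

-- ===== LEMMAS AND PROOFS =====

lemma upper_imp_alpha {c : Char} (h : PySem.Chars.isupper c = true) : PySem.Chars.isalpha c = true := by
  simp [PySem.Chars.isalpha, h]

lemma upper_lower_disjoint (c : Char) : ¬ (PySem.Chars.isupper c = true ∧ PySem.Chars.islower c = true) := by
  rintro ⟨hu, hl⟩
  simp only [PySem.Chars.isupper, PySem.Chars.islower, Bool.and_eq_true, decide_eq_true_eq] at hu hl
  have : ('a' : Char) ≤ 'Z' := le_trans hl.1 hu.2
  exact absurd this (by decide)

lemma islower_eq_not_isupper {c : Char} (h : PySem.Chars.isalpha c = true) :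
    PySem.Chars.islower c = ! PySem.Chars.isupper c := by
  cases hb : PySem.Chars.isupper c with
  | false =>
    have h' := h
    simp only [PySem.Chars.isalpha, hb, Bool.false_or] at h'
    simp [h']
  | true =>
    cases hl : PySem.Chars.islower c with
    | false => simp
    | true => exact absurd ⟨hb, hl⟩ (upper_lower_disjoint c)

-- pvLastUpperB characterization
lemma lastUpper_none {tl : List Char} (h : pvLastUpperB tl = none) :
    ∀ c ∈ tl, PySem.Chars.isupper c = false := by
  induction tl with
  | nil => intro c hc; cases hc
  | cons c cs ih =>
    intro d hd
    unfold pvLastUpperB at h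
    cases hk : pvLastUpperB cs with
    | some k => rw [hk] at h; cases h
    | none =>
      rw [hk] at h
      by_cases hu : PySem.Chars.isupper c = true
      · rw [if_pos hu] at h; cases h
      · rcases List.mem_cons.mp hd with rfl | hd'
        · simpa using hu
        · exact ih hk d hd'

lemma lastUpper_some {tl : List Char} {j : Nat} (h : pvLastUpperB tl = some j) :
    j < tl.length ∧ PySem.Chars.isupper (tl.getD j ' ') = true ∧
      ∀ c ∈ tl.drop (j + 1), PySem.Chars.isupper c = false := by
  induction tl generalizing j with
  | nil => cases h
  | cons c cs ih =>
    unfold pvLastUpperB at h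
    cases hk : pvLastUpperB cs with
    | some k =>
      rw [hk] at h
      injection h with h; subst h
      obtain ⟨h1, h2, h3⟩ := ih hk
      exact ⟨by simpa using Nat.succ_lt_succ h1, by simpa using h2, by simpa using h3⟩
    | none =>
      rw [hk] at h
      by_cases hu : PySem.Chars.isupper c = true
      · rw [if_pos hu] at h
        injection h with h; subst h
        exact ⟨Nat.succ_pos _, by simpa using hu, by simpa using lastUpper_none hk⟩
      · rw [if_neg hu] at h; cases h

-- pvUpRunA characterization
lemma upRun_upper (l : List Char) : ∀ i < pvUpRunA l, PySem.Chars.isupper (l.getD i ' ') = true := by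
  induction l with
  | nil => intro i hi; simp [pvUpRunA] at hi
  | cons c cs ih =>
    intro i hi
    unfold pvUpRunA at hi
    by_cases hu : PySem.Chars.isupper c = true
    · rw [if_pos hu] at hi
      cases i with
      | zero => simpa using hu
      | succ i => simpa using ih i (by omega)
    · rw [if_neg hu] at hi; omega

lemma upRun_append_upper {h t : List Char} (hall : ∀ c ∈ h, PySem.Chars.isupper c = true) :
    pvUpRunA (h ++ t) = h.length + pvUpRunA t := by
  induction h with
  | nil => simp
  | cons c cs ih =>
    have hc := hall c (by simp)
    simp only [List.cons_append, pvUpRunA, if_pos hc, ih (fun d hd => hall d (by simp [hd])),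
      List.length_cons]
    omega

lemma upRun_zero {t : List Char} (hall : ∀ c ∈ t, PySem.Chars.isupper c = false) :
    pvUpRunA t = 0 := by
  cases t with
  | nil => rfl
  | cons c cs => simp [pvUpRunA, hall c (by simp)]

-- letter count of take (j+1) is positive when tl[j] is a letter
lemma filter_take_pos {tl : List Char} {j : Nat} (hj : j < tl.length)
    (ha : PySem.Chars.isalpha (tl.getD j ' ') = true) :
    1 ≤ ((tl.take (j + 1)).filter PySem.Chars.isalpha).length := by
  have hjt : j < (tl.take (j + 1)).length := by simp; omega
  have hmem : tl[j] ∈ tl.take (j + 1) := by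
    have : (tl.take (j + 1))[j]'hjt = tl[j]'hj := List.getElem_take
    exact this ▸ List.getElem_mem hjt
  have ha' : PySem.Chars.isalpha (tl[j]'hj) = true := by
    rwa [List.getD_eq_getElem?_getD, List.getElem?_eq_getElem hj] at ha
  have : tl[j] ∈ (tl.take (j + 1)).filter PySem.Chars.isalpha := List.mem_filter.mpr ⟨hmem, ha'⟩
  exact List.length_pos_of_mem this

-- last element of head is tl[j]: head = head' ++ [tl[j]]
lemma filter_take_getLast {tl : List Char} {j : Nat} (hj : j < tl.length)
    (ha : PySem.Chars.isalpha (tl.getD j ' ') = true) :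
    ((tl.take (j + 1)).filter PySem.Chars.isalpha).getD
      (((tl.take (j + 1)).filter PySem.Chars.isalpha).length - 1) ' ' = tl.getD j ' ' := by
  induction tl generalizing j with
  | nil => simp at hj
  | cons c cs ih =>
    cases j with
    | zero =>
      have hc : PySem.Chars.isalpha c = true := by simpa using ha
      simp [List.take_succ_cons, hc]
    | succ j =>
      have hj' : j < cs.length := by simpa using hj
      have ha' : PySem.Chars.isalpha (cs.getD j ' ') = true := by simpa using ha
      have ihr := ih hj' ha'
      by_cases hc : PySem.Chars.isalpha c = true
      · have hpos := filter_take_pos hj' ha'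
        simp only [List.take_succ_cons, List.filter_cons, if_pos hc]
        rw [List.getD_eq_getElem?_getD] at ihr ⊢
        simp only [List.length_cons]
        have harith : ((cs.take (j + 1)).filter PySem.Chars.isalpha).length + 1 - 1
            = (((cs.take (j + 1)).filter PySem.Chars.isalpha).length - 1) + 1 := by omega
        rw [harith, List.getElem?_cons_succ]
        simpa using ihr
      · simp only [List.take_succ_cons, List.filter_cons, if_neg hc]
        simpa using ihr

-- A's output loop reaches exactly the prefix ending at index j when the letters in
-- that prefix number u - seen and tl[j] is a letter
lemma outLoop_eq_take (tl : List Char) : ∀ (j u seen : Nat), j < tl.length →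
    PySem.Chars.isalpha (tl.getD j ' ') = true →
    ((tl.take (j + 1)).filter PySem.Chars.isalpha).length + seen = u →
    pvOutLoopA u tl seen = tl.take (j + 1) := by
  induction tl with
  | nil => intro j u seen hj; simp at hj
  | cons c cs ih =>
    intro j u seen hj ha hcount
    cases j with
    | zero =>
      have hc : PySem.Chars.isalpha c = true := by simpa using ha
      simp only [List.take_succ_cons, List.take_zero, List.filter_cons, if_pos hc,
        List.filter_nil, List.length_cons, List.length_nil] at hcount
      simp [pvOutLoopA, hc, show u ≤ seen + 1 by omega]
    | succ j =>
      have hj' : j < cs.length := by simpa using hj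
      have ha' : PySem.Chars.isalpha (cs.getD j ' ') = true := by simpa using ha
      by_cases hc : PySem.Chars.isalpha c = true
      · simp only [List.take_succ_cons, List.filter_cons, if_pos hc, List.length_cons] at hcount
        have hpos := filter_take_pos hj' ha'
        have hnle : ¬ u ≤ seen + 1 := by omega
        simp only [pvOutLoopA, if_pos hc, if_neg hnle, List.take_succ_cons]
        rw [ih j u (seen + 1) hj' ha' (by omega)]
      · simp only [List.take_succ_cons, List.filter_cons, if_neg hc] at hcount
        simp only [pvOutLoopA, if_neg hc, List.take_succ_cons]
        rw [ih j u seen hj' ha' hcount]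

lemma getD_append_left {l r : List Char} {i : Nat} (h : i < l.length) :
    (l ++ r).getD i ' ' = l.getD i ' ' := by
  simp [List.getD_eq_getElem?_getD, List.getElem?_append_left h]

-- ===== VERDICT (by name: the statement is the Claim_ definition above) =====
theorem trim_uppercase_suffix_artifact_py_spec : Claim_equal_trim_uppercase_suffix_artifact_py := by
  intro token _
  unfold Spec_trim_uppercase_suffix_artifact_py
  unfold trim_uppercase_suffix_artifact_py trim_uppercase_suffix_artifact_py_alt
  simp only []
  set tl := token.toList with htl
  set alpha := tl.filter PySem.Chars.isalpha with halpha
  set u := pvUpRunA alpha with hudef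
  cases hfind : pvLastUpperB tl with
  | none =>
    -- no uppercase anywhere: A's run is 0, so A returns token through one of its guards
    dsimp only
    have hnoup := lastUpper_none hfind
    have hz : u = 0 := by
      rw [hudef]
      refine upRun_zero ?_
      intro c hc
      rw [halpha] at hc
      exact hnoup c (List.mem_filter.mp hc).1
    by_cases h4 : alpha.length < 4
    · rw [if_pos h4]
    · rw [if_neg h4, if_pos (by left; omega)]
  | some j =>
    obtain ⟨hj, hup, hafter⟩ := lastUpper_some hfind
    dsimp only
    set head := (tl.take (j + 1)).filter PySem.Chars.isalpha with hhead
    set tail := (tl.drop (j + 1)).filter PySem.Chars.isalpha with htail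
    have hsplit : alpha = head ++ tail := by
      rw [halpha, hhead, htail, ← List.filter_append, List.take_append_drop]
    have hja : PySem.Chars.isalpha (tl.getD j ' ') = true := upper_imp_alpha hup
    have htail_noup : ∀ c ∈ tail, PySem.Chars.isupper c = false := fun c hc =>
      hafter c (List.mem_filter.mp (htail ▸ hc)).1
    by_cases hB : head.length < 3 ∨ tail = [] ∨ ¬ head.all PySem.Chars.isupper = true
    · -- B returns token; show A does too
      rw [if_pos hB]
      by_cases h4 : alpha.length < 4
      · rw [if_pos h4]
      · rw [if_neg h4]
        by_cases hg : u < 3 ∨ alpha.length ≤ u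
        · rw [if_pos hg]
        · rw [if_neg hg]
          rw [not_or, not_lt, not_le] at hg
          obtain ⟨hu3, hulen⟩ := hg
          -- show the islower guard fires: alpha.drop u contains an uppercase
          rw [if_pos ?_]
          rintro ⟨hne, hlow⟩
          -- the last element of head is tl[j], uppercase, at alpha-index head.length - 1
          have hheadpos : 1 ≤ head.length := by rw [hhead]; exact filter_take_pos hj hja
          have hlastval : head.getD (head.length - 1) ' ' = tl.getD j ' ' := by
            rw [hhead]; exact filter_take_getLast hj hja
          have halphaval : alpha.getD (head.length - 1) ' ' = tl.getD j ' ' := by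
            rw [hsplit, getD_append_left (by omega)]; exact hlastval
          -- everything at index ≥ u in alpha is lowercase hence not uppercase
          have hlow' : ∀ i, u ≤ i → i < alpha.length → PySem.Chars.isupper (alpha.getD i ' ') = false := by
            intro i hui hil
            have hmem : alpha.getD i ' ' ∈ alpha.drop u := by
              have : (alpha.drop u).getD (i - u) ' ' = alpha.getD i ' ' := by
                simp [List.getD_eq_getElem?_getD, List.getElem?_drop, Nat.add_sub_cancel' hui]
              rw [← this]
              have hlt : i - u < (alpha.drop u).length := by simp; omega
              rw [List.getD_eq_getElem?_getD, List.getElem?_eq_getElem hlt]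
              exact List.getElem_mem hlt
            have hl := List.all_eq_true.mp hlow _ hmem
            have halm : PySem.Chars.isalpha (alpha.getD i ' ') = true := by
              have : alpha.getD i ' ' ∈ alpha := List.mem_of_mem_drop hmem
              exact (List.mem_filter.mp (halpha ▸ this)).2
            rw [islower_eq_not_isupper halm] at hl
            simpa using hl
          -- head.length - 1 < u since alpha[head.length-1] is uppercase
          have hhu : head.length ≤ u := by
            by_contra hcon
            have := hlow' (head.length - 1) (by omega) (by rw [hsplit]; simp; omega)
            rw [halphaval, hup] at this; cases this
          -- u ≤ head.length since alpha[head.length] (in tail, if any) is not uppercase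
          have hue : u = head.length := by
            by_contra hne'
            have hlt : head.length < u := by omega
            have hup2 := upRun_upper alpha head.length (hudef ▸ hlt)
            have hmem2 : alpha.getD head.length ' ' ∈ tail := by
              have hlen2 : head.length < alpha.length := by omega
              have htl2 : 0 < tail.length := by
                rw [hsplit] at hlen2; simp at hlen2; omega
              rw [hsplit]
              have : (head ++ tail).getD head.length ' ' = tail.getD 0 ' ' := by
                simp [List.getD_eq_getElem?_getD, List.getElem?_append_right (Nat.le_refl _)]
              rw [this, List.getD_eq_getElem?_getD, List.getElem?_eq_getElem htl2]
              exact List.getElem_mem htl2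
            rw [htail_noup _ hmem2] at hup2; cases hup2
          -- all of head is uppercase, tail nonempty: contradicts hB
          have hallup : head.all PySem.Chars.isupper = true := by
            rw [List.all_eq_true]
            intro c hc
            obtain ⟨i, hi, hval⟩ := List.getElem_of_mem hc
            have : head.getD i ' ' = c := by
              rw [List.getD_eq_getElem?_getD, List.getElem?_eq_getElem hi, hval]; rfl
            rw [← this, ← getD_append_left (r := tail) hi, ← hsplit]
            exact upRun_upper alpha i (by omega)
          have htne : tail ≠ [] := by
            intro hnil
            rw [hsplit, hnil, List.append_nil] at hulen
            omega
          rcases hB with hB | hB | hB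
          · omega
          · exact htne hB
          · exact hB hallup
    · -- B succeeds: show A takes the same output branch with the same value
      rw [if_neg hB]
      rw [not_or, not_or, not_lt] at hB
      obtain ⟨h3, htne, hallup'⟩ := hB
      rw [not_not] at hallup'
      have hallup : ∀ c ∈ head, PySem.Chars.isupper c = true := List.all_eq_true.mp hallup'
      have htz : pvUpRunA tail = 0 := upRun_zero htail_noup
      have hueq : u = head.length := by
        rw [hudef, hsplit, upRun_append_upper hallup, htz]; omega
      have htpos : 0 < tail.length := List.length_pos_of_ne_nil htne
      have hlen : alpha.length = head.length + tail.length := by rw [hsplit]; simp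
      rw [if_neg (by omega), if_neg (by rw [hueq]; omega)]
      have hdrop : alpha.drop u = tail := by
        rw [hsplit, hueq, List.drop_append_of_le_length (Nat.le_refl _)]
        simp
      have htlow : (alpha.drop u).all PySem.Chars.islower = true := by
        rw [hdrop, List.all_eq_true]
        intro c hc
        have halm : PySem.Chars.isalpha c = true := (List.mem_filter.mp (htail ▸ hc)).2
        rw [islower_eq_not_isupper halm, htail_noup c hc]
        rfl
      rw [if_neg (by rw [not_not]; exact ⟨by rw [hdrop]; exact htne, htlow⟩)]
      congr 1
      rw [outLoop_eq_take tl j u 0 hj hja (by rw [Nat.add_zero, ← hhead, hueq])]
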